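-- pv_equiv track=rewrite | github.com/adroguetth/Music-Charts-Intelligence | scripts/3_enrich_chart_data.py | detectar_tipo_canal
-- ===== SOURCE A (Python) =====
-- def detectar_tipo_canal(channel_title):
--     if not channel_title:
--         return {'channel_type': 'unknown'}
--     channel_lower = channel_title.lower()
--     if 'vevo' in channel_lower:
--         return {'channel_type': 'VEVO'}
--     elif 'topic' in channel_lower:
--         return {'channel_type': 'Topic'}
--     elif any(word in channel_lower for word in [
--         'records', 'music', 'label', 'entertainment', 'studios',
--         'production', 'presents', 'network'
--     ]):
--         return {'channel_type': 'Label/Studio'}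
--     elif any(word in channel_lower for word in [
--         'official', 'oficial', 'artist', 'band', 'singer',
--         'musician', 'rapper', 'dj', 'producer'
--     ]):
--         return {'channel_type': 'Artist Channel'}
--     elif any(word in channel_lower for word in [
--         'channel', 'tv', 'hd', 'video', 'videos'
--     ]):
--         return {'channel_type': 'User Channel'}
--     else:
--         if ' - ' in channel_title or ' | ' in channel_title:
--             return {'channel_type': 'Artist Channel'}
--         else:
--             return {'channel_type': 'General'}
-- ===== SOURCE B (Python) =====
-- # Text-driven multi-pattern scan: one pass over positions of the lowered title,
-- # startswith tests against a flat keyword->priority map fill a 5-slot flag table,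
-- # then the first set flag (lowest priority) picks the label.
-- KEYWORDS = {
--     'vevo': 0, 'topic': 1,
--     'records': 2, 'music': 2, 'label': 2, 'entertainment': 2, 'studios': 2,
--     'production': 2, 'presents': 2, 'network': 2,
--     'official': 3, 'oficial': 3, 'artist': 3, 'band': 3, 'singer': 3,
--     'musician': 3, 'rapper': 3, 'dj': 3, 'producer': 3,
--     'channel': 4, 'tv': 4, 'hd': 4, 'video': 4, 'videos': 4,
-- }
-- LABELS = ['VEVO', 'Topic', 'Label/Studio', 'Artist Channel', 'User Channel']
--
--
-- def detectar_tipo_canal(channel_title):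
--     if not channel_title:
--         return {'channel_type': 'unknown'}
--     low = channel_title.lower()
--     found = [False] * 5
--     for i in range(len(low)):
--         for kw, rank in KEYWORDS.items():
--             if low.startswith(kw, i):
--                 found[rank] = True
--     for rank, hit in enumerate(found):
--         if hit:
--             return {'channel_type': LABELS[rank]}
--     if ' - ' in channel_title or ' | ' in channel_title:
--         return {'channel_type': 'Artist Channel'}
--     return {'channel_type': 'General'}
-- ===== Notes on version B (the rewrite author's own statement) =====
-- stated objective: alternative
-- what changed: Replaces A's pattern-driven if/elif chain of per-keyword substring membership tests by a text-driven naive multi-pattern scan: one pass over the positions of the lowered title tests each position with startswith against a flat keyword-to-priority map, filling a 5-slot flag table, and the first set flag (lowest priority) picks the label; the separator fallback on the original title is kept.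
import Mathlib
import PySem

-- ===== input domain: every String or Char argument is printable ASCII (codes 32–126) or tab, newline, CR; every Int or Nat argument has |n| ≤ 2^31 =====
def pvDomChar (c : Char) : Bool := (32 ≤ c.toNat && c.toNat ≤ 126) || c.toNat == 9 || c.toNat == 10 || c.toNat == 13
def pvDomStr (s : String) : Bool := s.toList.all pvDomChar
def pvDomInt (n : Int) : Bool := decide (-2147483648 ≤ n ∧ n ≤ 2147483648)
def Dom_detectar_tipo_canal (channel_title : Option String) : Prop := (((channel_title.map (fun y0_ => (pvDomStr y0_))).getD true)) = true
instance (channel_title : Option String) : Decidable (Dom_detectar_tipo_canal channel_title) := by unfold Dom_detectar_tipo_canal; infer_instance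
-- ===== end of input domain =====

-- B replaces A's pattern-driven if/elif substring chain by a text-driven scan: one pass
-- over the positions of the lowered title fills a 5-slot priority flag table via
-- startswith tests, then the first set flag picks the label (objective: alternative).

-- ===== PORT A =====
-- Port of A: literal if/elif chain over the lowered title; separator fallback on the original.
def detectar_tipo_canal (channel_title : Option String) : List (String × String) :=
  match channel_title with
  | none => [("channel_type", "unknown")]
  | some s =>
    if s = "" then [("channel_type", "unknown")]
    else
      let channel_lower := PySem.Str.lower s
      if PySem.Str.isIn "vevo" channel_lower then [("channel_type", "VEVO")]
      else if PySem.Str.isIn "topic" channel_lower then [("channel_type", "Topic")]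
      else if ["records", "music", "label", "entertainment", "studios",
               "production", "presents", "network"].any
                (fun w => PySem.Str.isIn w channel_lower) then [("channel_type", "Label/Studio")]
      else if ["official", "oficial", "artist", "band", "singer",
               "musician", "rapper", "dj", "producer"].any
                (fun w => PySem.Str.isIn w channel_lower) then [("channel_type", "Artist Channel")]
      else if ["channel", "tv", "hd", "video", "videos"].any
                (fun w => PySem.Str.isIn w channel_lower) then [("channel_type", "User Channel")]
      else
        if PySem.Str.isIn " - " s || PySem.Str.isIn " | " s then [("channel_type", "Artist Channel")]
        else [("channel_type", "General")]

-- ===== PORT B =====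
-- Source B's KEYWORDS dict (keyword -> priority rank) in insertion order.
def pvKw : List (String × Nat) :=
  [("vevo", 0), ("topic", 1),
   ("records", 2), ("music", 2), ("label", 2), ("entertainment", 2), ("studios", 2),
   ("production", 2), ("presents", 2), ("network", 2),
   ("official", 3), ("oficial", 3), ("artist", 3), ("band", 3), ("singer", 3),
   ("musician", 3), ("rapper", 3), ("dj", 3), ("producer", 3),
   ("channel", 4), ("tv", 4), ("hd", 4), ("video", 4), ("videos", 4)]

def pvLabels : List String := ["VEVO", "Topic", "Label/Studio", "Artist Channel", "User Channel"]

-- the double loop: for i in range(len(low)): for kw, rank in KEYWORDS.items():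
--   if low.startswith(kw, i): found[rank] = True
-- (low.startswith(kw, i) with 0 ≤ i ≤ len(low) is exactly kw.toList.isPrefixOf (low.drop i))
def pvScan (low : List Char) : List Bool :=
  (List.range low.length).foldl
    (fun f i => pvKw.foldl
      (fun f2 p => if p.1.toList.isPrefixOf (low.drop i) then f2.set p.2 true else f2) f)
    [false, false, false, false, false]

-- for rank, hit in enumerate(found): if hit: return LABELS[rank]  (rank is always 0..4, in range)
def pvPick : List (Int × Bool) → Option String
  | [] => none
  | (rank, hit) :: rest => if hit then some (PySem.List.pyGetD pvLabels rank "") else pvPick rest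

def detectar_tipo_canal_alt (channel_title : Option String) : List (String × String) :=
  match channel_title with
  | none => [("channel_type", "unknown")]
  | some s =>
    if s = "" then [("channel_type", "unknown")]
    else
      let low := (PySem.Str.lower s).toList
      let found := pvScan low
      match pvPick (PySem.List.enumerate found) with
      | some lab => [("channel_type", lab)]
      | none =>
        if PySem.Str.isIn " - " s || PySem.Str.isIn " | " s then [("channel_type", "Artist Channel")]
        else [("channel_type", "General")]

-- ===== PRECONDITION & SPEC =====
def Spec_detectar_tipo_canal (channel_title : Option String) (out : List (String × String)) : Prop := out = detectar_tipo_canal_alt channel_title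
instance (channel_title : Option String) (out : List (String × String)) : Decidable (Spec_detectar_tipo_canal channel_title out) := by unfold Spec_detectar_tipo_canal; infer_instance

-- ===== CLAIM (what is proved, stated in full; the proofs are below) =====
def Claim_equal_detectar_tipo_canal : Prop := ∀ (channel_title : Option String), Dom_detectar_tipo_canal channel_title → Spec_detectar_tipo_canal channel_title (detectar_tipo_canal channel_title)

-- ===== LEMMAS AND PROOFS =====

-- flag for rank r after scanning: some position i carries some rank-r keyword
def pvOcc (low : List Char) (r : Nat) : Bool :=
  (List.range low.length).any
    (fun i => pvKw.any (fun p => decide (p.2 = r) && p.1.toList.isPrefixOf (low.drop i)))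

lemma pv_getD_set_true (f : List Bool) (j r : Nat) :
    (f.set j true).getD r false = ((decide (j = r) && decide (j < f.length)) || f.getD r false) := by
  by_cases h : j = r
  · subst h
    by_cases h2 : j < f.length <;> simp [List.getD, h2]
  · simp [List.getD, h]

lemma pv_inner_len (d : List Char) (l : List (String × Nat)) (f : List Bool) :
    (l.foldl (fun f2 p => if p.1.toList.isPrefixOf d then f2.set p.2 true else f2) f).length
      = f.length := by
  induction l generalizing f with
  | nil => rfl
  | cons p l ih =>
    simp only [List.foldl_cons]
    rw [ih]
    by_cases hp : p.1.toList.isPrefixOf d <;> simp [hp]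

lemma pv_inner_fold (d : List Char) (l : List (String × Nat)) (hl : ∀ p ∈ l, p.2 < 5)
    (f : List Bool) (hf : f.length = 5) (r : Nat) :
    (l.foldl (fun f2 p => if p.1.toList.isPrefixOf d then f2.set p.2 true else f2) f).getD r false
      = (f.getD r false || l.any (fun p => decide (p.2 = r) && p.1.toList.isPrefixOf d)) := by
  induction l generalizing f with
  | nil => simp
  | cons p l ih =>
    simp only [List.foldl_cons, List.any_cons]
    rw [ih (fun q hq => hl q (List.mem_cons_of_mem _ hq)) _
        (by by_cases hp : p.1.toList.isPrefixOf d <;> simp [hp, hf])]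
    by_cases hp : p.1.toList.isPrefixOf d
    · have h5 : p.2 < 5 := hl p List.mem_cons_self
      simp only [hp, if_true, pv_getD_set_true, hf, Bool.and_true]
      by_cases hr : p.2 = r
      · subst hr
        simp [h5]
      · simp [hr]
    · simp [hp]

lemma pv_outer_len (low : List Char) (n : Nat) :
    ((List.range n).foldl
      (fun f i => pvKw.foldl
        (fun f2 p => if p.1.toList.isPrefixOf (low.drop i) then f2.set p.2 true else f2) f)
      [false, false, false, false, false]).length = 5 := by
  induction n with
  | zero => rfl
  | succ n ih =>
    rw [List.range_succ, List.foldl_append]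
    simp only [List.foldl_cons, List.foldl_nil]
    rw [pv_inner_len, ih]

lemma pv_scan_getD (low : List Char) (r : Nat) :
    (pvScan low).getD r false = pvOcc low r := by
  have hl : ∀ p ∈ pvKw, p.2 < 5 := by decide
  unfold pvScan pvOcc
  generalize low.length = n
  induction n with
  | zero =>
    rcases r with _|_|_|_|_|r <;> rfl
  | succ n ih =>
    rw [List.range_succ, List.foldl_append, List.any_append]
    simp only [List.foldl_cons, List.foldl_nil, List.any_cons, List.any_nil, Bool.or_false]
    rw [pv_inner_fold _ _ hl _ (pv_outer_len low n) r, ih]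

lemma pv_scan_eq (low : List Char) :
    pvScan low = [pvOcc low 0, pvOcc low 1, pvOcc low 2, pvOcc low 3, pvOcc low 4] := by
  have hlen : (pvScan low).length = 5 := pv_outer_len low low.length
  apply List.ext_getElem (by simp [hlen])
  intro i h1 h2
  have : (pvScan low)[i] = (pvScan low).getD i false := by
    rw [List.getD_eq_getElem _ _ h1]
  rw [this, pv_scan_getD]
  have h5 : i < 5 := by simpa using h2
  interval_cases i <;> rfl

lemma pv_bounded_iff (kw low : List Char) (h : kw ≠ []) :
    (∃ i, i < low.length ∧ kw.isPrefixOf (low.drop i) = true) ↔ PySem.Chars.isIn kw low = true := by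
  rw [← PySem.Chars.exists_prefix_drop_iff_isIn]
  constructor
  · rintro ⟨i, _, hp⟩
    exact ⟨i, List.isPrefixOf_iff_prefix.mp hp⟩
  · rintro ⟨j, hp⟩
    have hj : j < low.length := by
      rcases Nat.lt_or_ge j low.length with h' | h'
      · exact h'
      · rw [List.drop_eq_nil_of_le h'] at hp
        exact absurd (List.prefix_nil.mp hp) h
    exact ⟨j, hj, List.isPrefixOf_iff_prefix.mpr hp⟩

lemma pv_occ_eq (low : List Char) (r : Nat) :
    pvOcc low r = pvKw.any (fun p => decide (p.2 = r) && PySem.Chars.isIn p.1.toList low) := by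
  have hne : ∀ p ∈ pvKw, p.1.toList ≠ [] := by decide
  rw [Bool.eq_iff_iff]
  simp only [pvOcc, List.any_eq_true, List.mem_range, Bool.and_eq_true, decide_eq_true_eq]
  constructor
  · rintro ⟨i, hi, p, hp, hr, hpre⟩
    exact ⟨p, hp, hr, (pv_bounded_iff _ _ (hne p hp)).mp ⟨i, hi, hpre⟩⟩
  · rintro ⟨p, hp, hr, hin⟩
    obtain ⟨i, hi, hpre⟩ := (pv_bounded_iff _ _ (hne p hp)).mpr hin
    exact ⟨i, hi, p, hp, hr, hpre⟩

-- ===== VERDICT (by name: the statement is the Claim_ definition above) =====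
theorem detectar_tipo_canal_spec : Claim_equal_detectar_tipo_canal := by
  intro t _
  unfold Spec_detectar_tipo_canal detectar_tipo_canal detectar_tipo_canal_alt
  cases t with
  | none => rfl
  | some s =>
    by_cases hs : s = ""
    · simp [hs]
    · simp only [hs, if_false]
      rw [pv_scan_eq]
      simp only [pv_occ_eq]
      simp [pvKw, pvLabels, PySem.List.enumerate, pvPick, PySem.List.pyGetD]
      split_ifs <;> simp_all
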